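-- pv_equiv track=rewrite | github.com/reidxu/Lazor_Project | find_configurations.py | get_boards
-- ===== SOURCE A (Python) =====
-- def get_boards(grid, configs):
--     '''
--     Find all the configurations of the available spots on the board
--
--     **Parameters**
--
--         grid: *array*
--             The grid of board elements
--         configs: *list*
--             A list containing all lists of configurations of the availabe spots.
--
--     **Returns**
--
--         boards: *list*
--             A list containing all lists of configurations of the board.
--     '''
--     list_of_board = []
--     boards = []
--
--     for row in grid:
--         for element in row:
--             list_of_board.append(element)
--
--     for config in configs:
--         count = 0
--         new = []
--         for entry in list_of_board:
--             if entry == 'o':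
--                 new.append(config[count])
--                 count = count + 1
--             else:
--                 new.append(entry)
--
--         boards.append(new)
--     return boards
-- ===== SOURCE B (Python) =====
-- def get_boards(grid, configs):
--     # Flatten once, precompute the indices of the open spots ('o'),
--     # then for each config copy the template and write only at those indices.
--     template = [e for row in grid for e in row]
--     o_idxs = [i for i, e in enumerate(template) if e == 'o']
--     boards = []
--     for config in configs:
--         board = template[:]
--         for i, idx in enumerate(o_idxs):
--             board[idx] = config[i]
--         boards.append(board)
--     return boards
-- ===== Notes on version B (the rewrite author's own statement) =====
-- stated objective: alternative
-- what changed: B flattens the grid once and precomputes the list of 'o' indices, then fills each config by copying the template and writing only at those indices, instead of A's per-config branch-and-counter scan over every cell.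
-- outside the precondition, e.g. on get_boards([['o', 'o']], [['A']]): A raises IndexError, B raises IndexError
import Mathlib
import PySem

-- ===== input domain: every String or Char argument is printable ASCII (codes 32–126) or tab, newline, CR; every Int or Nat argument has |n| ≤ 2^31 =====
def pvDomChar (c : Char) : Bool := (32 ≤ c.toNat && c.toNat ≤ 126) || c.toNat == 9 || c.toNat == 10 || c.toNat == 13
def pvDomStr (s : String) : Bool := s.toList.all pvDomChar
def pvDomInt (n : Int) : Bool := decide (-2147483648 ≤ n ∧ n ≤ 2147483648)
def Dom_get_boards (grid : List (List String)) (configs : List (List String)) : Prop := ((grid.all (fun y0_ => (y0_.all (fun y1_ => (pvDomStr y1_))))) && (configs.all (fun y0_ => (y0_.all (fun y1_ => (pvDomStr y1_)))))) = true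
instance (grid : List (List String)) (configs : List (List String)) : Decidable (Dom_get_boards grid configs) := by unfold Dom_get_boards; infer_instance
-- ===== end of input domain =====

-- B precomputes the 'o' index table once and fills each config by copying the template and
-- writing at those indices, instead of A's per-config branch-and-counter scan (objective: alternative).


-- ===== PORT A =====
def get_boards (grid : List (List String)) (configs : List (List String)) : List (List String) :=
  let list_of_board := grid.foldl (fun acc row => row.foldl (fun a e => a ++ [e]) acc) []
  configs.foldl (fun boards config =>
    let p := list_of_board.foldl (fun (s : Int × List String) entry =>
      if entry == "o" then (s.1 + 1, s.2 ++ [(PySem.List.pyGet? config s.1).getD ""])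
      else (s.1, s.2 ++ [entry])) ((0 : Int), ([] : List String))
    boards ++ [p.2]) []

-- ===== PORT B =====
def get_boards_alt (grid : List (List String)) (configs : List (List String)) : List (List String) :=
  let template := grid.flatMap (fun row => row)
  let o_idxs := (PySem.List.enumerate template 0).filterMap
    (fun p => if p.2 == "o" then some p.1 else none)
  configs.foldl (fun boards config =>
    let board := (PySem.List.enumerate o_idxs 0).foldl
      (fun b p => PySem.List.pySetD b p.2 ((PySem.List.pyGet? config p.1).getD "")) template
    boards ++ [board]) []

-- ===== PRECONDITION & SPEC =====
-- Pre_ excludes exactly the inputs where some config is shorter than the number of 'o'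
-- cells, on which the Python (A and B alike) raises IndexError.
def Pre_get_boards (grid : List (List String)) (configs : List (List String)) : Prop :=
  ∀ c ∈ configs, (grid.flatMap (fun row => row)).count "o" ≤ c.length
instance (grid : List (List String)) (configs : List (List String)) : Decidable (Pre_get_boards grid configs) := by unfold Pre_get_boards; infer_instance

def pvWitness_get_boards : List (List String) × List (List String) :=
  ([["o", "x"], ["o"]], [["A", "B"], ["1", "2"]])

def Spec_get_boards (grid : List (List String)) (configs : List (List String)) (out : List (List String)) : Prop := out = get_boards_alt grid configs
instance (grid : List (List String)) (configs : List (List String)) (out : List (List String)) : Decidable (Spec_get_boards grid configs out) := by unfold Spec_get_boards; infer_instance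

-- ===== CLAIM (what is proved, stated in full; the proofs are below) =====
def Claim_equal_get_boards : Prop := ∀ (grid : List (List String)) (configs : List (List String)), Dom_get_boards grid configs → Pre_get_boards grid configs → Spec_get_boards grid configs (get_boards grid configs)

-- ===== LEMMAS AND PROOFS =====

-- reference result of one config pass: each 'o', counted from c, replaced by config[c+k]
def pvFill (cfg : List String) : List String → Int → List String
  | [], _ => []
  | x :: xs, c =>
    if x == "o" then (PySem.List.pyGet? cfg c).getD "" :: pvFill cfg xs (c + 1)
    else x :: pvFill cfg xs c

def pvIdx (xs : List String) (s : Int) : List Int :=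
  (PySem.List.enumerate xs s).filterMap (fun p => if p.2 == "o" then some p.1 else none)

lemma pvIdx_cons (x : String) (xs : List String) (s : Int) :
    pvIdx (x :: xs) s = if x == "o" then s :: pvIdx xs (s + 1) else pvIdx xs (s + 1) := by
  unfold pvIdx
  rw [PySem.List.enumerate_cons, List.filterMap_cons]
  by_cases hx : x == "o" <;> simp [hx]

lemma foldl_append_singleton (l : List String) (a : List String) :
    l.foldl (fun a e => a ++ [e]) a = a ++ l := by
  induction l generalizing a with
  | nil => simp
  | cons x xs ih => simp [List.foldl_cons, ih]

lemma flatten_eq (grid : List (List String)) (acc : List String) :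
    grid.foldl (fun acc row => row.foldl (fun a e => a ++ [e]) acc) acc
      = acc ++ grid.flatMap (fun row => row) := by
  induction grid generalizing acc with
  | nil => simp
  | cons r rs ih =>
    rw [List.foldl_cons, foldl_append_singleton, ih]
    simp

lemma scanA_eq_fill (cfg : List String) (xs : List String) (c : Int) (acc : List String) :
    (xs.foldl (fun (s : Int × List String) entry =>
      if entry == "o" then (s.1 + 1, s.2 ++ [(PySem.List.pyGet? cfg s.1).getD ""])
      else (s.1, s.2 ++ [entry])) (c, acc)).2 = acc ++ pvFill cfg xs c := by
  induction xs generalizing c acc with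
  | nil => simp [pvFill]
  | cons x xs ih =>
    rw [List.foldl_cons]
    by_cases hx : x == "o"
    · rw [if_pos hx, ih]
      simp [pvFill, hx]
    · rw [if_neg hx, ih]
      simp [pvFill, hx]

lemma set_append_cons (pre : List String) (x : String) (xs : List String) (v : String) :
    (pre ++ x :: xs).set pre.length v = pre ++ v :: xs := by
  induction pre with
  | nil => simp
  | cons p ps ih => simp [ih]

lemma writeB_eq_fill (cfg : List String) (xs : List String) (pre : List String) (c : Int) :
    (PySem.List.enumerate (pvIdx xs (pre.length : Int)) c).foldl
      (fun b p => PySem.List.pySetD b p.2 ((PySem.List.pyGet? cfg p.1).getD "")) (pre ++ xs)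
    = pre ++ pvFill cfg xs c := by
  induction xs generalizing pre c with
  | nil => simp [pvIdx, pvFill, PySem.List.enumerate]
  | cons x xs ih =>
    rw [pvIdx_cons]
    by_cases hx : x == "o"
    · have h1 : ((pre.length : Int) + 1) = (((pre ++ [(PySem.List.pyGet? cfg c).getD ""]).length : Int)) := by
        simp
      have h2 := ih (pre := pre ++ [(PySem.List.pyGet? cfg c).getD ""]) (c := c + 1)
      simp only [hx, if_true, PySem.List.enumerate_cons, List.foldl_cons]
      rw [show PySem.List.pySetD (pre ++ x :: xs) (pre.length : Int)
            ((PySem.List.pyGet? cfg c).getD "") = pre ++ ((PySem.List.pyGet? cfg c).getD "") :: xs by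
        rw [PySem.List.pySetD_natCast, set_append_cons]]
      rw [h1]
      rw [show pre ++ ((PySem.List.pyGet? cfg c).getD "") :: xs
            = (pre ++ [(PySem.List.pyGet? cfg c).getD ""]) ++ xs by simp]
      rw [h2]
      simp [pvFill, hx]
    · have h1 : ((pre.length : Int) + 1) = (((pre ++ [x]).length : Int)) := by simp
      have h2 := ih (pre := pre ++ [x]) (c := c)
      simp only [hx, if_false, Bool.false_eq_true]
      rw [h1, show pre ++ x :: xs = (pre ++ [x]) ++ xs by simp, h2]
      simp [pvFill, hx]

lemma foldl_append_map {α β : Type} (f : α → β) (l : List α) (acc : List β) :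
    l.foldl (fun bs c => bs ++ [f c]) acc = acc ++ l.map f := by
  induction l generalizing acc with
  | nil => simp
  | cons x xs ih => simp [List.foldl_cons, ih]

lemma get_boards_eq_map (grid : List (List String)) (configs : List (List String)) :
    get_boards grid configs
      = configs.map (fun cfg => pvFill cfg (grid.flatMap (fun row => row)) 0) := by
  unfold get_boards
  rw [flatten_eq]
  simp only [List.nil_append]
  rw [show (fun (boards : List (List String)) (config : List String) =>
      boards ++ [(List.foldl (fun (s : Int × List String) entry =>
        if entry == "o" then (s.1 + 1, s.2 ++ [(PySem.List.pyGet? config s.1).getD ""])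
        else (s.1, s.2 ++ [entry])) ((0 : Int), ([] : List String))
        (grid.flatMap (fun row => row))).2])
    = fun boards config => boards ++ [pvFill config (grid.flatMap fun row => row) 0] by
      funext boards config
      rw [scanA_eq_fill]
      simp]
  rw [foldl_append_map]
  simp

lemma get_boards_alt_eq_map (grid : List (List String)) (configs : List (List String)) :
    get_boards_alt grid configs
      = configs.map (fun cfg => pvFill cfg (grid.flatMap (fun row => row)) 0) := by
  show List.foldl (fun (boards : List (List String)) (config : List String) =>
      boards ++ [List.foldl (fun b p => PySem.List.pySetD b p.2 ((PySem.List.pyGet? config p.1).getD ""))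
        (grid.flatMap fun row => row)
        (PySem.List.enumerate ((PySem.List.enumerate (grid.flatMap fun row => row) 0).filterMap
          (fun p => if p.2 == "o" then some p.1 else none)) 0)]) [] configs
    = configs.map (fun cfg => pvFill cfg (grid.flatMap (fun row => row)) 0)
  rw [show (fun (boards : List (List String)) (config : List String) =>
      boards ++ [List.foldl (fun b p => PySem.List.pySetD b p.2 ((PySem.List.pyGet? config p.1).getD ""))
        (grid.flatMap fun row => row)
        (PySem.List.enumerate ((PySem.List.enumerate (grid.flatMap fun row => row) 0).filterMap
          (fun p => if p.2 == "o" then some p.1 else none)) 0)])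
    = fun (boards : List (List String)) (config : List String) =>
        boards ++ [pvFill config (grid.flatMap fun row => row) 0] from
    funext fun boards => funext fun config => by
      have h := writeB_eq_fill config (grid.flatMap fun row => row) [] 0
      simp only [List.nil_append, List.length_nil, Nat.cast_zero] at h
      rw [show ((PySem.List.enumerate (grid.flatMap fun row => row) 0).filterMap
          (fun p => if p.2 == "o" then some p.1 else none))
          = pvIdx (grid.flatMap fun row => row) 0 from rfl, h]]
  rw [foldl_append_map]
  simp

-- ===== VERDICT (by name: the statement is the Claim_ definition above) =====
theorem get_boards_spec : Claim_equal_get_boards := by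
  intro grid configs _ _
  unfold Spec_get_boards
  rw [get_boards_eq_map, get_boards_alt_eq_map]
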